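-- pv_equiv track=rewrite | github.com/devanshutak25/blenderKey | keymap_visualizer/keymap_data.py | _group_bindings
-- ===== SOURCE A (Python) =====
-- def _humanize_op_id(idname):
--     """'mesh.extrude_region_move' -> 'Extrude Region Move' (drop category prefix)."""
--     parts = idname.split('.')
--     if len(parts) == 2:
--         return parts[1].replace('_', ' ').title()
--     return idname.replace('_', ' ').title()
--
-- def _group_bindings(bindings, n_matching):
--     """Group flat binding list by (op_id, mod_str). Returns list of group tuples.
--
--     Each group: (group_key, human_name, mod_str, entries, best_color_rank)
--       - group_key: (op_id, mod_str) for expand/collapse tracking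
--       - entries: list of (orig_index, binding_tuple) preserving original order
--       - best_color_rank: 0=matching, 1=non_matching, 2=inactive (for header color)
--     """
--     from collections import OrderedDict
--     groups_dict = OrderedDict()
--     for i, binding in enumerate(bindings):
--         op_id = binding[1]
--         mod_str = binding[2]
--         key = (op_id, mod_str)
--         if key not in groups_dict:
--             groups_dict[key] = []
--         groups_dict[key].append((i, binding))
--
--     result = []
--     for group_key, entries in groups_dict.items():
--         op_id, mod_str = group_key
--         human_name = _humanize_op_id(op_id)
--         # Compute best color rank: 0=matching, 1=non_matching_active, 2=inactive
--         best_rank = 2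
--         for orig_idx, b in entries:
--             is_active = b[4]
--             if not is_active:
--                 rank = 2
--             elif orig_idx < n_matching:
--                 rank = 0
--             else:
--                 rank = 1
--             if rank < best_rank:
--                 best_rank = rank
--         result.append((group_key, human_name, mod_str, entries, best_rank))
--     return result
-- ===== SOURCE B (Python) =====
-- def _humanize_op_id(idname):
--     """'mesh.extrude_region_move' -> 'Extrude Region Move' (drop category prefix)."""
--     parts = idname.split('.')
--     if len(parts) == 2:
--         return parts[1].replace('_', ' ').title()
--     return idname.replace('_', ' ').title()
--
-- def _group_bindings(bindings, n_matching):
--     """Dict-free re-implementation: scan for first occurrences of each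
--     (op_id, mod_str) key, and build each group directly by filtering the
--     enumerated list for that key; the best color rank is a min over the
--     group's ranks.  First-occurrence order equals dict insertion order,
--     and filtering preserves the original order inside a group."""
--     indexed = list(enumerate(bindings))
--     result = []
--     seen = []
--     for i, b in indexed:
--         key = (b[1], b[2])
--         if key in seen:
--             continue
--         seen.append(key)
--         entries = [(j, c) for j, c in indexed if (c[1], c[2]) == key]
--         best = min(((2 if not c[4] else (0 if j < n_matching else 1))
--                     for j, c in entries), default=2)
--         result.append((key, _humanize_op_id(key[0]), key[1], entries, best))
--     return result
-- ===== Notes on version B (the rewrite author's own statement) =====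
-- stated objective: alternative
-- what changed: B drops the OrderedDict entirely: it scans for the first occurrence of each (op_id, mod_str) key and builds each group by filtering the enumerated list for that key, taking the best rank as a min over the group's ranks, instead of A's incremental dict grouping followed by a per-group rank loop; it trades A's O(n) grouping for an O(n*g) filter-based one.
import Mathlib
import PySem

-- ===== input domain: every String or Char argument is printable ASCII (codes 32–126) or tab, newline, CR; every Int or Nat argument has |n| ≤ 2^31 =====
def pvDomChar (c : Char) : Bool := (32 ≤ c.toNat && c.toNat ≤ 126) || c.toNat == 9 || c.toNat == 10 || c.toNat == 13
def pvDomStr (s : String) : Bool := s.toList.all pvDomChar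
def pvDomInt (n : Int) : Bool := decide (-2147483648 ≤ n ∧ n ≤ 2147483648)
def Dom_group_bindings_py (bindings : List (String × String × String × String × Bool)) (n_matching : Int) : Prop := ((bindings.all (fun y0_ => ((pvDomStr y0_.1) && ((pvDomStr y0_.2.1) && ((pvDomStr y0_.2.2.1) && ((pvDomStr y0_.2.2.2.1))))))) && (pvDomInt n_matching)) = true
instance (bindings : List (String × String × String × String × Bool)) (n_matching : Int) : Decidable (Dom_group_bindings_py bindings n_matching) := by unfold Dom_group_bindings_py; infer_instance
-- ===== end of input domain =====

-- B replaces A's OrderedDict grouping + per-group rank loop by a dict-free first-occurrence scan that builds each group by filtering the enumerated list; same return value, an alternative decomposition.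

abbrev PvBind := String × String × String × String × Bool
abbrev PvEntry := Int × PvBind
abbrev PvGroup := (String × String) × String × String × List PvEntry × Int

-- ===== PORT A =====
-- shared helper: str.title(), hand-ported character by character (exact on the stated ASCII domain, where 'cased' = ASCII letter)
def pyTitleChars : List Char → Bool → List Char
  | [], _ => []
  | c :: cs, prevAlpha =>
    (if c.isAlpha then (if prevAlpha then c.toLower else c.toUpper) else c) :: pyTitleChars cs c.isAlpha

-- _humanize_op_id, used verbatim by both A and B
def humanizeOpId (idname : String) : String :=
  let parts := PySem.Chars.splitOn idname.toList ['.']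
  if parts.length = 2 then
    String.ofList (pyTitleChars (PySem.Chars.replace (parts.getD 1 []) ['_'] [' ']) false)
  else
    String.ofList (pyTitleChars (PySem.Chars.replace idname.toList ['_'] [' ']) false)

-- A's grouping-loop body: `if key not in d: d[key] = []` then `d[key].append(...)`
def stepA (d : PySem.Dict (String × String) (List PvEntry)) (p : PvEntry) :
    PySem.Dict (String × String) (List PvEntry) :=
  let key := (p.2.2.1, p.2.2.2.1)
  let d1 := if d.contains key then d else d.insert key []
  d1.insert key (d1.getD key [] ++ [p])

-- A's per-group inner loop computing best_rank (rank ladder inlined as in the source)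
def bestRank (n : Int) (es : List PvEntry) : Int :=
  es.foldl (fun best e =>
    let rank := if e.2.2.2.2.2 = false then 2 else if e.1 < n then 0 else 1
    if rank < best then rank else best) 2

def group_bindings_py (bindings : List (String × String × String × String × Bool)) (n_matching : Int) : List ((String × String) × String × String × (List (Int × (String × String × String × String × Bool))) × Int) :=
  let gd := (PySem.List.enumerate bindings 0).foldl stepA PySem.Dict.empty
  gd.items.foldl (fun result g =>
    result ++ [(g.1, humanizeOpId g.1.1, g.1.2, g.2, bestRank n_matching g.2)]) []

-- ===== PORT B =====
-- B's rank of one enumerated binding: `2 if not c[4] else (0 if j < n_matching else 1)`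
def rankB (n : Int) (q : PvEntry) : Int :=
  if q.2.2.2.2.2 = false then 2 else if q.1 < n then 0 else 1

-- B's loop body over the enumerated list: skip seen keys, else emit the whole group at once
def stepB (indexed : List PvEntry) (n : Int) (acc : List (String × String) × List PvGroup)
    (p : PvEntry) : List (String × String) × List PvGroup :=
  let key := (p.2.2.1, p.2.2.2.1)
  if key ∈ acc.1 then acc
  else
    let entries := indexed.filter (fun q => decide ((q.2.2.1, q.2.2.2.1) = key))
    let best := (entries.map (rankB n)).foldl min 2
    (acc.1 ++ [key], acc.2 ++ [(key, humanizeOpId key.1, key.2, entries, best)])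

def group_bindings_py_alt (bindings : List (String × String × String × String × Bool)) (n_matching : Int) : List ((String × String) × String × String × (List (Int × (String × String × String × String × Bool))) × Int) :=
  let indexed := PySem.List.enumerate bindings 0
  (indexed.foldl (stepB indexed n_matching) ([], [])).2

-- ===== PRECONDITION & SPEC =====
-- manual DecidableEq chain for the output type (plain instance search exceeds its size limit on this nesting)
def pvDecEqEntries : DecidableEq (List (Int × (String × String × String × String × Bool))) := List.hasDecEq
def pvDecEqGroup : DecidableEq ((String × String) × String × String × (List (Int × (String × String × String × String × Bool))) × Int) :=
  @instDecidableEqProd _ _ inferInstance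
    (@instDecidableEqProd _ _ inferInstance
      (@instDecidableEqProd _ _ inferInstance
        (@instDecidableEqProd _ _ pvDecEqEntries inferInstance)))
def pvDecEqOut : DecidableEq (List ((String × String) × String × String × (List (Int × (String × String × String × String × Bool))) × Int)) :=
  @List.hasDecEq _ pvDecEqGroup

def Spec_group_bindings_py (bindings : List (String × String × String × String × Bool)) (n_matching : Int) (out : List ((String × String) × String × String × (List (Int × (String × String × String × String × Bool))) × Int)) : Prop := out = group_bindings_py_alt bindings n_matching
instance (bindings : List (String × String × String × String × Bool)) (n_matching : Int) (out : List ((String × String) × String × String × (List (Int × (String × String × String × String × Bool))) × Int)) : Decidable (Spec_group_bindings_py bindings n_matching out) := by unfold Spec_group_bindings_py; exact pvDecEqOut _ _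

-- ===== CLAIM (what is proved, stated in full; the proofs are below) =====
def Claim_equal_group_bindings_py : Prop := ∀ (bindings : List (String × String × String × String × Bool)) (n_matching : Int), Dom_group_bindings_py bindings n_matching → Spec_group_bindings_py bindings n_matching (group_bindings_py bindings n_matching)

-- ===== LEMMAS AND PROOFS =====

-- the entries of the group keyed k, read off the whole enumerated list
def filtK (l : List PvEntry) (k : String × String) : List PvEntry :=
  l.filter (fun q => decide ((q.2.2.1, q.2.2.2.1) = k))

-- first occurrences of keys of `rem` that are not yet in `seen`, in order
def auxKeys : List PvEntry → List (String × String) → List (String × String)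
  | [], _ => []
  | p :: rest, seen =>
    if (p.2.2.1, p.2.2.2.1) ∈ seen then auxKeys rest seen
    else (p.2.2.1, p.2.2.2.1) :: auxKeys rest (seen ++ [(p.2.2.1, p.2.2.2.1)])

lemma not_mem_of_mem_auxKeys : ∀ (rem : List PvEntry) (seen : List (String × String)) (k),
    k ∈ auxKeys rem seen → k ∉ seen := by
  intro rem
  induction rem with
  | nil => intro seen k h; simp [auxKeys] at h
  | cons p rest ih =>
    intro seen k h
    by_cases hm : (p.2.2.1, p.2.2.2.1) ∈ seen
    · rw [auxKeys, if_pos hm] at h; exact ih seen k h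
    · rw [auxKeys, if_neg hm] at h
      rcases List.mem_cons.mp h with h | h
      · subst h; exact hm
      · intro hk; exact ih _ k h (by simp [hk])

def mkGroupB (l : List PvEntry) (n : Int) (k : String × String) : PvGroup :=
  (k, humanizeOpId k.1, k.2, filtK l k, ((filtK l k).map (rankB n)).foldl min 2)

lemma B_fold (l : List PvEntry) (n : Int) : ∀ (rem : List PvEntry) (seen res),
    rem.foldl (stepB l n) (seen, res)
      = (seen ++ auxKeys rem seen, res ++ (auxKeys rem seen).map (mkGroupB l n)) := by
  intro rem
  induction rem with
  | nil => intro seen res; simp [auxKeys]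
  | cons p rest ih =>
    intro seen res
    by_cases hm : (p.2.2.1, p.2.2.2.1) ∈ seen
    · rw [List.foldl_cons, auxKeys, if_pos hm]
      have hs : stepB l n (seen, res) p = (seen, res) := by
        simp [stepB, hm]
      rw [hs, ih]
    · rw [List.foldl_cons, auxKeys, if_neg hm]
      have hs : stepB l n (seen, res) p
          = (seen ++ [(p.2.2.1, p.2.2.2.1)], res ++ [mkGroupB l n (p.2.2.1, p.2.2.2.1)]) := by
        simp [stepB, hm, mkGroupB, filtK]
      rw [hs, ih]
      simp

lemma filtK_cons_self (p : PvEntry) (rem : List PvEntry) :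
    filtK (p :: rem) (p.2.2.1, p.2.2.2.1) = p :: filtK rem (p.2.2.1, p.2.2.2.1) := by
  simp [filtK]

lemma filtK_cons_ne (p : PvEntry) (rem : List PvEntry) (k : String × String)
    (h : (p.2.2.1, p.2.2.2.1) ≠ k) : filtK (p :: rem) k = filtK rem k := by
  simp [filtK, h]

lemma A_fold : ∀ (rem : List PvEntry) (d : PySem.Dict (String × String) (List PvEntry)),
    d.keys.Nodup →
    (rem.foldl stepA d).items
      = d.items.map (fun q => (q.1, q.2 ++ filtK rem q.1))
        ++ (auxKeys rem d.keys).map (fun k => (k, filtK rem k)) := by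
  intro rem
  induction rem with
  | nil =>
    intro d _
    simp [auxKeys, filtK]
  | cons p rest ih =>
    intro d hnd
    have hkeys : d.keys = d.items.map (·.1) := rfl
    by_cases hm : (p.2.2.1, p.2.2.2.1) ∈ d.keys
    · -- key already grouped: overwrite in place
      have hc : d.contains (p.2.2.1, p.2.2.2.1) = true := by
        rw [PySem.Dict.contains_eq_decide_mem_keys]; simpa using hm
      have hstep : stepA d p
          = d.insert (p.2.2.1, p.2.2.2.1)
              (d.getD (p.2.2.1, p.2.2.2.1) [] ++ [p]) := by
        simp [stepA, hc]
      have hnd' : (stepA d p).keys.Nodup := by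
        rw [hstep]; exact PySem.Dict.nodup_keys_insert _ _ _ hnd
      rw [List.foldl_cons, ih _ hnd']
      have hkeys' : (stepA d p).keys = d.keys := by
        rw [hstep]; exact PySem.Dict.keys_insert_of_contains d _ hc
      have hitems' : (stepA d p).items
          = d.items.map (fun q => if q.1 = (p.2.2.1, p.2.2.2.1)
              then (q.1, q.2 ++ [p]) else q) := by
        rw [hstep, PySem.Dict.items_insert_of_contains d _ hc]
        refine List.map_congr_left (fun q hq => ?_)
        by_cases hqk : q.1 = (p.2.2.1, p.2.2.2.1)
        · have : d.getD (p.2.2.1, p.2.2.2.1) [] = q.2 :=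
            PySem.Dict.getD_of_mem_items d (by rw [← hqk]; simpa using hq) hnd []
          simp [hqk, this]
        · simp [hqk]
      rw [hitems', hkeys', List.map_map]
      rw [auxKeys, if_pos hm]
      congr 1
      · refine List.map_congr_left (fun q hq => ?_)
        by_cases hqk : q.1 = (p.2.2.1, p.2.2.2.1)
        · simp only [Function.comp, hqk, if_pos]
          rw [filtK_cons_self]
          simp
        · simp only [Function.comp, if_neg hqk]
          rw [filtK_cons_ne p _ _ (fun h => hqk h.symm)]
      · refine List.map_congr_left (fun k hk => ?_)
        have hknotin := not_mem_of_mem_auxKeys _ _ _ hk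
        have : (p.2.2.1, p.2.2.2.1) ≠ k := fun h => hknotin (h ▸ hm)
        rw [filtK_cons_ne p _ _ this]
    · -- fresh key: append
      have hc : d.contains (p.2.2.1, p.2.2.2.1) = false := by
        rw [PySem.Dict.contains_eq_decide_mem_keys]; simpa using hm
      have hstep : stepA d p = d.insert (p.2.2.1, p.2.2.2.1) [p] := by
        simp only [stepA, hc, Bool.false_eq_true, if_false]
        rw [PySem.Dict.getD_insert_self]
        rw [PySem.Dict.insert_insert_self]
        simp
      have hnd' : (stepA d p).keys.Nodup := by
        rw [hstep]; exact PySem.Dict.nodup_keys_insert _ _ _ hnd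
      rw [List.foldl_cons, ih _ hnd']
      have hkeys' : (stepA d p).keys = d.keys ++ [(p.2.2.1, p.2.2.2.1)] := by
        rw [hstep]; exact PySem.Dict.keys_insert_of_not_contains d _ hc
      have hitems' : (stepA d p).items = d.items ++ [((p.2.2.1, p.2.2.2.1), [p])] := by
        rw [hstep]; exact PySem.Dict.items_insert_of_not_contains d _ hc
      have hne : ∀ q ∈ d.items, q.1 ≠ (p.2.2.1, p.2.2.2.1) := by
        intro q hq h
        exact hm (by rw [hkeys, ← h]; exact List.mem_map_of_mem hq)
      rw [hitems', hkeys', List.map_append]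
      rw [auxKeys, if_neg hm, List.map_cons]
      rw [List.append_assoc]
      congr 1
      · refine List.map_congr_left (fun q hq => ?_)
        rw [filtK_cons_ne p _ _ (fun h => hne q hq h.symm)]
      · have htail : List.map (fun k => (k, filtK (p :: rest) k))
              (auxKeys rest (d.keys ++ [(p.2.2.1, p.2.2.2.1)]))
            = List.map (fun k => (k, filtK rest k))
              (auxKeys rest (d.keys ++ [(p.2.2.1, p.2.2.2.1)])) := by
          refine List.map_congr_left (fun k hk => ?_)
          have hknotin := not_mem_of_mem_auxKeys _ _ _ hk
          have hne2 : (p.2.2.1, p.2.2.2.1) ≠ k := by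
            intro h; exact hknotin (by simp [h])
          rw [filtK_cons_ne p _ _ hne2]
        rw [List.map_cons, htail, filtK_cons_self]
        simp

lemma bestRank_eq_foldl_min (n : Int) (es : List PvEntry) :
    bestRank n es = (es.map (rankB n)).foldl min 2 := by
  suffices h : ∀ (l : List PvEntry) (b : Int),
      l.foldl (fun best e =>
        let rank := if e.2.2.2.2.2 = false then 2 else if e.1 < n then 0 else 1
        if rank < best then rank else best) b = (l.map (rankB n)).foldl min b from h es 2
  intro l
  induction l with
  | nil => intro b; rfl
  | cons e l ih =>
    intro b
    rw [List.map_cons, List.foldl_cons, List.foldl_cons, ih]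
    congr 1
    simp only [rankB]
    split_ifs <;> omega

-- ===== VERDICT (by name: the statement is the Claim_ definition above) =====
theorem group_bindings_py_spec : Claim_equal_group_bindings_py := by
  intro bindings n _
  unfold Spec_group_bindings_py group_bindings_py
  show _ = ((PySem.List.enumerate bindings 0).foldl
      (stepB (PySem.List.enumerate bindings 0) n) ([], [])).2
  rw [PySem.List.foldl_append_singleton_eq_map]
  rw [A_fold (PySem.List.enumerate bindings 0) PySem.Dict.empty PySem.Dict.nodup_keys_empty]
  rw [B_fold (PySem.List.enumerate bindings 0) n (PySem.List.enumerate bindings 0) [] []]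
  have hempty : (PySem.Dict.empty : PySem.Dict (String × String) (List PvEntry)).items = [] := rfl
  have hkeys : (PySem.Dict.empty : PySem.Dict (String × String) (List PvEntry)).keys = [] := rfl
  rw [hempty, hkeys]
  simp only [List.map_nil, List.nil_append, List.map_map]
  refine List.map_congr_left (fun k _ => ?_)
  simp [Function.comp, mkGroupB, bestRank_eq_foldl_min]
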